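-- pv_equiv track=rewrite | github.com/jhall4/Advent-of-Code | aoc2021/Code/DayTen.py | GetIllegalCharScore
-- ===== SOURCE A (Python) =====
-- def GetIllegalCharScore(illegalChars):
--     score = 0
--     for char in illegalChars:
--         if char == ')':
--             score += 3
--         elif char == ']':
--             score += 57
--         elif char == '}':
--             score += 1197
--         elif char == '>':
--             score += 25137
--     return score
-- ===== SOURCE B (Python) =====
-- def GetIllegalCharScore(illegalChars):
--     return (3 * illegalChars.count(')')
--             + 57 * illegalChars.count(']')
--             + 1197 * illegalChars.count('}')
--             + 25137 * illegalChars.count('>'))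
-- ===== Notes on version B (the rewrite author's own statement) =====
-- stated objective: alternative
-- what changed: Replaces the single streaming pass with an if/elif accumulator by a closed-form weighted combination of four list.count passes, one per scoring character, with no loop or accumulator in the source.
import Mathlib
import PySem

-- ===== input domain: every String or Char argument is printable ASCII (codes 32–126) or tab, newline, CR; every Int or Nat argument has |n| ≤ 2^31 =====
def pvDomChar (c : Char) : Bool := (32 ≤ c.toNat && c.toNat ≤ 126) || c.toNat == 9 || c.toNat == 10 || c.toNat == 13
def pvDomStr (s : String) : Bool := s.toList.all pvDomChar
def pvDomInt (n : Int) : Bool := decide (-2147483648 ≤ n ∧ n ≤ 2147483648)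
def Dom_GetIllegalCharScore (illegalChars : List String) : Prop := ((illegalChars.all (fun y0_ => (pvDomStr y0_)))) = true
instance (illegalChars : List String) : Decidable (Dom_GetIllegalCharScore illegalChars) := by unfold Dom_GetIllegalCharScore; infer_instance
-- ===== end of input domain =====

-- B replaces A's streaming if/elif accumulation by a loop-free closed form: four list.count passes combined in one weighted expression (alternative decomposition, same result).

-- ===== PORT A =====
def GetIllegalCharScore (illegalChars : List String) : Int :=
  illegalChars.foldl
    (fun score char =>
      if char == ")" then score + 3
      else if char == "]" then score + 57
      else if char == "}" then score + 1197
      else if char == ">" then score + 25137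
      else score)
    0

-- ===== PORT B =====
def GetIllegalCharScore_alt (illegalChars : List String) : Int :=
  3 * (PySem.List.count illegalChars ")")
    + 57 * (PySem.List.count illegalChars "]")
    + 1197 * (PySem.List.count illegalChars "}")
    + 25137 * (PySem.List.count illegalChars ">")

-- ===== PRECONDITION & SPEC =====
def Spec_GetIllegalCharScore (illegalChars : List String) (out : Int) : Prop := out = GetIllegalCharScore_alt illegalChars
instance (illegalChars : List String) (out : Int) : Decidable (Spec_GetIllegalCharScore illegalChars out) := by unfold Spec_GetIllegalCharScore; infer_instance

-- ===== CLAIM (what is proved, stated in full; the proofs are below) =====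
def Claim_equal_GetIllegalCharScore : Prop := ∀ (illegalChars : List String), Dom_GetIllegalCharScore illegalChars → Spec_GetIllegalCharScore illegalChars (GetIllegalCharScore illegalChars)

-- ===== LEMMAS AND PROOFS =====

theorem portA_shift (xs : List String) (s : Int) :
    xs.foldl
      (fun score char =>
        if char == ")" then score + 3
        else if char == "]" then score + 57
        else if char == "}" then score + 1197
        else if char == ">" then score + 25137
        else score) s
    = s + 3 * (xs.count ")" : Int) + 57 * (xs.count "]" : Int)
        + 1197 * (xs.count "}" : Int) + 25137 * (xs.count ">" : Int) := by
  induction xs generalizing s with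
  | nil => simp
  | cons c xs ih =>
    rw [List.foldl_cons, ih]
    simp only [List.count_cons, beq_iff_eq]
    split_ifs <;> first | (push_cast; omega) | simp_all

-- ===== VERDICT (by name: the statement is the Claim_ definition above) =====
theorem GetIllegalCharScore_spec : Claim_equal_GetIllegalCharScore := by
  intro xs _
  unfold Spec_GetIllegalCharScore GetIllegalCharScore GetIllegalCharScore_alt
  rw [portA_shift]
  simp only [PySem.List.count_eq, zero_add]
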